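-- pv_equiv track=rewrite | github.com/lanseyege/zero-knowledge-proof-work | bulletproof/bulletproof/fnizk/utils.py | get_t1
-- ===== SOURCE A (Python) =====
-- def get_t1(al, ar, SL, SR, y, z, lens, p):
--     res = 0
--     _y = 1
--     _tw = 1
--     for i in range(lens):
--         res += ((al[i] - z) * (_y * SR[i]) + SL[i] *( _y * (ar[i] + z) + z*z*_tw)) % p
--
--         _y = (_y * y) % p
--         _tw *= 2
--
--     return res % p
-- ===== SOURCE B (Python) =====
-- def get_t1(al, ar, SL, SR, y, z, lens, p):
--     ypow = []
--     twos = []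
--     yi = 1
--     ti = 1
--     for _ in range(lens):
--         ypow.append(yi)
--         twos.append(ti)
--         yi = (yi * y) % p
--         ti *= 2
--     s1 = sum((al[i] - z) * ypow[i] * SR[i] for i in range(lens))
--     s2 = sum(SL[i] * ypow[i] * (ar[i] + z) for i in range(lens))
--     s3 = sum(SL[i] * z * z * twos[i] for i in range(lens))
--     return (s1 + s2 + s3) % p
-- ===== Notes on version B (the rewrite author's own statement) =====
-- stated objective: alternative
-- what changed: Replaces A's single fused loop (running y-power, running 2-power, per-term mod accumulation) with a precompute-then-sum structure: build the y-power and 2-power tables once, then compute three separate unreduced sums S1, S2, S3 over the vectors and reduce (S1+S2+S3) mod p only once at the end.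
import Mathlib
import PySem

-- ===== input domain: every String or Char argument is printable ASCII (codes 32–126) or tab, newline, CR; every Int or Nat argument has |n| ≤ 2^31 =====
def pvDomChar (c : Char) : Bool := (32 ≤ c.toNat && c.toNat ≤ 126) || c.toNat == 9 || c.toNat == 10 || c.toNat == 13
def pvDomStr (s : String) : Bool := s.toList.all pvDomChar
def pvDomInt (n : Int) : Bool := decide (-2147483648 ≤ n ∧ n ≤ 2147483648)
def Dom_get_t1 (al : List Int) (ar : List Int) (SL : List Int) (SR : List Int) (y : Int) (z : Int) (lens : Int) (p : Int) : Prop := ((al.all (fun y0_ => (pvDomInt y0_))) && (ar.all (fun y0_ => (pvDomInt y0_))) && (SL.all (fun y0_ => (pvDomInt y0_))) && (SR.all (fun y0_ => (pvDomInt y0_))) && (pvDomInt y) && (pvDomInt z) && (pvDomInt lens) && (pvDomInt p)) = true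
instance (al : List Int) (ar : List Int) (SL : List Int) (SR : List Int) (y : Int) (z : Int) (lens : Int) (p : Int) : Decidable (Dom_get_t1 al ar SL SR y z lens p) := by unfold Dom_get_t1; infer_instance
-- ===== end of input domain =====

-- B replaces A's single fused accumulation loop by a precompute-the-power-tables pass
-- followed by three separate plain summations, reducing mod p only once at the end
-- (objective: alternative decomposition, same O(n) cost).

-- ===== PORT A =====
def get_t1 (al : List Int) (ar : List Int) (SL : List Int) (SR : List Int) (y : Int) (z : Int) (lens : Int) (p : Int) : Int :=
  let st := (PySem.List.pyRange 0 lens 1).foldl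
    (fun (st : Int × Int × Int) i =>
      (st.1 + PySem.Int.mod ((PySem.List.pyGetD al i 0 - z) * (st.2.1 * PySem.List.pyGetD SR i 0)
          + PySem.List.pyGetD SL i 0 * (st.2.1 * (PySem.List.pyGetD ar i 0 + z) + z * z * st.2.2)) p,
       PySem.Int.mod (st.2.1 * y) p,
       st.2.2 * 2))
    (0, 1, 1)
  PySem.Int.mod st.1 p

-- ===== PORT B =====
def get_t1_alt (al : List Int) (ar : List Int) (SL : List Int) (SR : List Int) (y : Int) (z : Int) (lens : Int) (p : Int) : Int :=
  let idx := PySem.List.pyRange 0 lens 1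
  let tabs := idx.foldl
    (fun (st : List Int × List Int × Int × Int) _ =>
      (st.1 ++ [st.2.2.1], st.2.1 ++ [st.2.2.2], PySem.Int.mod (st.2.2.1 * y) p, st.2.2.2 * 2))
    ([], [], 1, 1)
  let ypow := tabs.1
  let twos := tabs.2.1
  let s1 := idx.foldl (fun acc i => acc + (PySem.List.pyGetD al i 0 - z) * PySem.List.pyGetD ypow i 0 * PySem.List.pyGetD SR i 0) 0
  let s2 := idx.foldl (fun acc i => acc + PySem.List.pyGetD SL i 0 * PySem.List.pyGetD ypow i 0 * (PySem.List.pyGetD ar i 0 + z)) 0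
  let s3 := idx.foldl (fun acc i => acc + PySem.List.pyGetD SL i 0 * z * z * PySem.List.pyGetD twos i 0) 0
  PySem.Int.mod (s1 + s2 + s3) p

-- ===== PRECONDITION & SPEC =====
-- Pre_ excludes exactly the inputs where Python A raises: p = 0 (ZeroDivisionError on '% p')
-- and lens exceeding the length of any of the four vectors (IndexError).
def Pre_get_t1 (al : List Int) (ar : List Int) (SL : List Int) (SR : List Int) (y : Int) (z : Int) (lens : Int) (p : Int) : Prop :=
  p ≠ 0 ∧ lens ≤ (al.length : Int) ∧ lens ≤ (ar.length : Int) ∧ lens ≤ (SL.length : Int) ∧ lens ≤ (SR.length : Int)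
instance (al : List Int) (ar : List Int) (SL : List Int) (SR : List Int) (y : Int) (z : Int) (lens : Int) (p : Int) : Decidable (Pre_get_t1 al ar SL SR y z lens p) := by unfold Pre_get_t1; infer_instance

def pvWitness_get_t1 : List Int × List Int × List Int × List Int × Int × Int × Int × Int :=
  ([1, 2], [3, 4], [5, 6], [7, 8], 3, 2, 2, 11)

def Spec_get_t1 (al : List Int) (ar : List Int) (SL : List Int) (SR : List Int) (y : Int) (z : Int) (lens : Int) (p : Int) (out : Int) : Prop := out = get_t1_alt al ar SL SR y z lens p
instance (al : List Int) (ar : List Int) (SL : List Int) (SR : List Int) (y : Int) (z : Int) (lens : Int) (p : Int) (out : Int) : Decidable (Spec_get_t1 al ar SL SR y z lens p out) := by unfold Spec_get_t1; infer_instance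

-- ===== CLAIM (what is proved, stated in full; the proofs are below) =====
def Claim_equal_get_t1 : Prop := ∀ (al : List Int) (ar : List Int) (SL : List Int) (SR : List Int) (y : Int) (z : Int) (lens : Int) (p : Int), Dom_get_t1 al ar SL SR y z lens p → Pre_get_t1 al ar SL SR y z lens p → Spec_get_t1 al ar SL SR y z lens p (get_t1 al ar SL SR y z lens p)

-- ===== LEMMAS AND PROOFS =====

-- running reduced power of y, as A's `_y` holds it at the start of iteration k
def pvYpw (y p : Int) : Nat → Int
  | 0 => 1
  | k + 1 => PySem.Int.mod (pvYpw y p k * y) p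

theorem pvFoldA (al ar SL SR : List Int) (y z p : Int) (n : Nat) :
    (PySem.List.pyRange 0 (n : Int) 1).foldl
      (fun (st : Int × Int × Int) i =>
        (st.1 + PySem.Int.mod ((PySem.List.pyGetD al i 0 - z) * (st.2.1 * PySem.List.pyGetD SR i 0)
            + PySem.List.pyGetD SL i 0 * (st.2.1 * (PySem.List.pyGetD ar i 0 + z) + z * z * st.2.2)) p,
         PySem.Int.mod (st.2.1 * y) p,
         st.2.2 * 2))
      (0, 1, 1)
    = (((List.range n).map (fun (k : Nat) => PySem.Int.mod
          ((PySem.List.pyGetD al (k : Int) 0 - z) * (pvYpw y p k * PySem.List.pyGetD SR (k : Int) 0)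
            + PySem.List.pyGetD SL (k : Int) 0 * (pvYpw y p k * (PySem.List.pyGetD ar (k : Int) 0 + z) + z * z * 2 ^ k)) p)).sum,
        pvYpw y p n, 2 ^ n) := by
  induction n with
  | zero => simp [PySem.List.pyRange_one_eq_nil le_rfl, pvYpw]
  | succ n ih =>
    have h : ((n + 1 : Nat) : Int) = (n : Int) + 1 := by push_cast; ring
    rw [h, PySem.List.pyRange_one_succ_right (by positivity), List.foldl_append, ih]
    simp [List.range_succ, pvYpw, pow_succ]

theorem pvFoldT (y p : Int) (n : Nat) :
    (PySem.List.pyRange 0 (n : Int) 1).foldl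
      (fun (st : List Int × List Int × Int × Int) _ =>
        (st.1 ++ [st.2.2.1], st.2.1 ++ [st.2.2.2], PySem.Int.mod (st.2.2.1 * y) p, st.2.2.2 * 2))
      ([], [], 1, 1)
    = ((PySem.List.pyRange 0 (n : Int) 1).map (fun i => pvYpw y p i.toNat),
       (PySem.List.pyRange 0 (n : Int) 1).map (fun i => (2 : Int) ^ i.toNat),
       pvYpw y p n, (2 : Int) ^ n) := by
  induction n with
  | zero => simp [PySem.List.pyRange_one_eq_nil le_rfl, pvYpw]
  | succ n ih =>
    have h : ((n + 1 : Nat) : Int) = (n : Int) + 1 := by push_cast; ring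
    rw [h, PySem.List.pyRange_one_succ_right (by positivity), List.foldl_append, List.map_append, List.map_append, ih]
    simp [pvYpw, pow_succ]

theorem pvSumFmod (p : Int) (l : List Int) :
    ((l.map (fun t => PySem.Int.mod t p)).sum).fmod p = (l.sum).fmod p := by
  induction l with
  | nil => rfl
  | cons t l ih =>
    simp only [List.map_cons, List.sum_cons, PySem.Int.mod] at ih ⊢
    rw [Int.add_fmod, Int.fmod_fmod_of_dvd _ dvd_rfl, ih, ← Int.add_fmod]

theorem pvSumSplit (f g h F : Nat → Int) (l : List Nat) (hp : ∀ k, F k = f k + g k + h k) :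
    (l.map F).sum = (l.map f).sum + (l.map g).sum + (l.map h).sum := by
  induction l with
  | nil => simp
  | cons a l ih => simp [ih, hp a]; ring

-- ===== VERDICT (by name: the statement is the Claim_ definition above) =====
theorem get_t1_spec : Claim_equal_get_t1 := by
  intro al ar SL SR y z lens p _hdom _hpre
  unfold Spec_get_t1 get_t1 get_t1_alt
  by_cases hl : lens ≤ 0
  · simp [PySem.List.pyRange_one_eq_nil hl]
  · have hn : lens = ((lens.toNat : Nat) : Int) := by omega
    rw [hn]
    set n := lens.toNat with hnn
    simp only []
    rw [pvFoldA, pvFoldT]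
    have e1 : List.foldl (fun acc i => acc + (PySem.List.pyGetD al i 0 - z) * PySem.List.pyGetD ((PySem.List.pyRange 0 (n : Int) 1).map (fun i => pvYpw y p i.toNat)) i 0 * PySem.List.pyGetD SR i 0) 0 (PySem.List.pyRange 0 (n : Int) 1)
        = List.foldl (fun acc i => acc + (PySem.List.pyGetD al i 0 - z) * pvYpw y p i.toNat * PySem.List.pyGetD SR i 0) 0 (PySem.List.pyRange 0 (n : Int) 1) := by
      apply PySem.List.foldl_congr_mem
      intro acc i hi
      rw [PySem.List.pyGetD_map_pyRange_of_nonneg _ _ _ _ ((PySem.List.mem_pyRange_one.mp hi).1) ((PySem.List.mem_pyRange_one.mp hi).2)]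
    have e2 : List.foldl (fun acc i => acc + PySem.List.pyGetD SL i 0 * PySem.List.pyGetD ((PySem.List.pyRange 0 (n : Int) 1).map (fun i => pvYpw y p i.toNat)) i 0 * (PySem.List.pyGetD ar i 0 + z)) 0 (PySem.List.pyRange 0 (n : Int) 1)
        = List.foldl (fun acc i => acc + PySem.List.pyGetD SL i 0 * pvYpw y p i.toNat * (PySem.List.pyGetD ar i 0 + z)) 0 (PySem.List.pyRange 0 (n : Int) 1) := by
      apply PySem.List.foldl_congr_mem
      intro acc i hi
      rw [PySem.List.pyGetD_map_pyRange_of_nonneg _ _ _ _ ((PySem.List.mem_pyRange_one.mp hi).1) ((PySem.List.mem_pyRange_one.mp hi).2)]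
    have e3 : List.foldl (fun acc i => acc + PySem.List.pyGetD SL i 0 * z * z * PySem.List.pyGetD ((PySem.List.pyRange 0 (n : Int) 1).map (fun i => (2 : Int) ^ i.toNat)) i 0) 0 (PySem.List.pyRange 0 (n : Int) 1)
        = List.foldl (fun acc i => acc + PySem.List.pyGetD SL i 0 * z * z * (2 : Int) ^ i.toNat) 0 (PySem.List.pyRange 0 (n : Int) 1) := by
      apply PySem.List.foldl_congr_mem
      intro acc i hi
      rw [PySem.List.pyGetD_map_pyRange_of_nonneg _ _ _ _ ((PySem.List.mem_pyRange_one.mp hi).1) ((PySem.List.mem_pyRange_one.mp hi).2)]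
    rw [e1, e2, e3]
    rw [PySem.List.foldl_add, PySem.List.foldl_add, PySem.List.foldl_add]
    simp only [PySem.List.pyRange_zero_natCast, List.map_map, zero_add, Function.comp_def,
      Int.toNat_natCast]
    rw [← pvSumSplit
      (fun k => (PySem.List.pyGetD al (k : Int) 0 - z) * pvYpw y p k * PySem.List.pyGetD SR (k : Int) 0)
      (fun k => PySem.List.pyGetD SL (k : Int) 0 * pvYpw y p k * (PySem.List.pyGetD ar (k : Int) 0 + z))
      (fun k => PySem.List.pyGetD SL (k : Int) 0 * z * z * (2 : Int) ^ k)
      (fun (k : Nat) => (PySem.List.pyGetD al (k : Int) 0 - z) * (pvYpw y p k * PySem.List.pyGetD SR (k : Int) 0)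
            + PySem.List.pyGetD SL (k : Int) 0 * (pvYpw y p k * (PySem.List.pyGetD ar (k : Int) 0 + z) + z * z * 2 ^ k))
      (List.range n) (fun k => by ring)]
    have h2 := pvSumFmod p ((List.range n).map (fun (k : Nat) =>
        (PySem.List.pyGetD al (k : Int) 0 - z) * (pvYpw y p k * PySem.List.pyGetD SR (k : Int) 0)
            + PySem.List.pyGetD SL (k : Int) 0 * (pvYpw y p k * (PySem.List.pyGetD ar (k : Int) 0 + z) + z * z * 2 ^ k)))
    simp only [List.map_map, Function.comp_def] at h2
    simpa [PySem.Int.mod] using h2
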